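-- pv_equiv track=rewrite | github.com/AlexShein/Algorithmic-tasks | python/diagonal_products.py | sum_prod_diags
-- ===== SOURCE A (Python) =====
-- def sum_prod_diags(matrix: list[list[int]]) -> int:
--     dimension = len(matrix)
--     products_sum = 0
--     for offset in range(dimension):
--         p1 = m1 = 1
--         p2 = m2 = int(bool(offset))  # So that products of first diagonals are not duplicated
--
--         for j in range(dimension - offset):
--             # Major diagonals
--             p1 *= matrix[j][j + offset]
--             p2 *= matrix[j + offset][j]
--             # Minor diagonals
--             m1 *= matrix[dimension - j - 1][j + offset]
--             m2 *= matrix[dimension - j - 1 - offset][j]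
--         products_sum += p1 + p2 - m1 - m2
--
--     return products_sum
-- ===== SOURCE B (Python) =====
-- def sum_prod_diags(matrix: list[list[int]]) -> int:
--     n = len(matrix)
--     maj = {}
--     minr = {}
--     for i in range(n):
--         for j in range(n):
--             v = matrix[i][j]
--             maj[i - j] = maj.get(i - j, 1) * v
--             minr[i + j] = minr.get(i + j, 1) * v
--     return sum(maj.values()) - sum(minr.values())
-- ===== Notes on version B (the rewrite author's own statement) =====
-- stated objective: simpler
-- what changed: Instead of one loop per offset maintaining four simultaneous running products with an int(bool(offset)) anti-duplication sentinel, B makes a single pass over all cells, grouping each cell into two dicts keyed by its diagonal index (i-j for major, i+j for minor diagonals) with a running product per key, and returns sum(maj.values()) - sum(minr.values()).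
import Mathlib
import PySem

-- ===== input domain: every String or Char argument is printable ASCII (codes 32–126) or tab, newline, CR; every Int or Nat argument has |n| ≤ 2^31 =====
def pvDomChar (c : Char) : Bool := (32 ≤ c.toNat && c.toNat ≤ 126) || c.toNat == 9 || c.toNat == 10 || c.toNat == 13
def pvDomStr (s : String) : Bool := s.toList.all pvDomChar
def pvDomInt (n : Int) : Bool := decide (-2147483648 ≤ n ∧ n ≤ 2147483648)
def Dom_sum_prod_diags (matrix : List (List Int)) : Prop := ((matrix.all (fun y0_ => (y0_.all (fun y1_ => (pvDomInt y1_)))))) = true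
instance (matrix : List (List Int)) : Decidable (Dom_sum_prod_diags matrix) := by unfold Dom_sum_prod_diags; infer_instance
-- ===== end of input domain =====

-- B replaces A's per-offset loop with four hand-maintained running products by a single pass over all
-- cells grouping products into two dicts keyed by diagonal index (i-j / i+j); objective: simpler.

-- ===== PORT A =====
def sum_prod_diags (matrix : List (List Int)) : Int :=
  let dimension : Int := (matrix.length : Int)
  let products_sum : Int := 0
  (PySem.List.pyRange 0 dimension 1).foldl
    (fun products_sum offset =>
      let st := (PySem.List.pyRange 0 (dimension - offset) 1).foldl
        (fun (st : Int × Int × Int × Int) j =>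
          (st.1 * PySem.List.pyGetD (PySem.List.pyGetD matrix j []) (j + offset) 0,
           st.2.1 * PySem.List.pyGetD (PySem.List.pyGetD matrix (j + offset) []) j 0,
           st.2.2.1 * PySem.List.pyGetD (PySem.List.pyGetD matrix (dimension - j - 1) []) (j + offset) 0,
           st.2.2.2 * PySem.List.pyGetD (PySem.List.pyGetD matrix (dimension - j - 1 - offset) []) j 0))
        (1, (if offset == 0 then 0 else 1), 1, (if offset == 0 then 0 else 1))
      products_sum + (st.1 + st.2.1 - st.2.2.1 - st.2.2.2))
    products_sum

-- ===== PORT B =====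
def sum_prod_diags_alt (matrix : List (List Int)) : Int :=
  let n : Int := (matrix.length : Int)
  let st := (PySem.List.pyRange 0 n 1).foldl
    (fun (st : PySem.Dict Int Int × PySem.Dict Int Int) i =>
      (PySem.List.pyRange 0 n 1).foldl
        (fun (st : PySem.Dict Int Int × PySem.Dict Int Int) j =>
          let v := PySem.List.pyGetD (PySem.List.pyGetD matrix i []) j 0
          (st.1.insert (i - j) (st.1.getD (i - j) 1 * v),
           st.2.insert (i + j) (st.2.getD (i + j) 1 * v)))
        st)
    (PySem.Dict.empty, PySem.Dict.empty)
  st.1.values.sum - st.2.values.sum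

-- ===== PRECONDITION & SPEC =====
-- Pre_ excludes only matrices with a row shorter than the number of rows: there Python A (and Python B)
-- raises IndexError.
def Pre_sum_prod_diags (matrix : List (List Int)) : Prop :=
  ∀ row ∈ matrix, matrix.length ≤ row.length
instance (matrix : List (List Int)) : Decidable (Pre_sum_prod_diags matrix) := by
  unfold Pre_sum_prod_diags; infer_instance
def pvWitness_sum_prod_diags : List (List Int) := [[1, 2], [3, 4]]

def Spec_sum_prod_diags (matrix : List (List Int)) (out : Int) : Prop := out = sum_prod_diags_alt matrix
instance (matrix : List (List Int)) (out : Int) : Decidable (Spec_sum_prod_diags matrix out) := by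
  unfold Spec_sum_prod_diags; infer_instance

-- ===== CLAIM (what is proved, stated in full; the proofs are below) =====
def Claim_equal_sum_prod_diags : Prop := ∀ (matrix : List (List Int)), Dom_sum_prod_diags matrix → Pre_sum_prod_diags matrix → Spec_sum_prod_diags matrix (sum_prod_diags matrix)

-- ===== LEMMAS AND PROOFS =====

-- the cell matrix[i][j] (0 outside; both ports only read cells that exist under Pre_)
def pvCell (m : List (List Int)) (p : Nat × Nat) : Int := (m.getD p.1 []).getD p.2 0
-- all cell coordinates of an n×n matrix in row-major (traversal) order
def pvGrid (n : Nat) : List (Nat × Nat) :=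
  (List.range n).flatMap (fun i => (List.range n).map (fun j => (i, j)))
-- product of the cells on major diagonal i-j = k, resp. minor diagonal i+j = s
def pvP (m : List (List Int)) (n : Nat) (k : Int) : Int :=
  (((pvGrid n).filter (fun p => (p.1 : Int) - (p.2 : Int) == k)).map (pvCell m)).prod
def pvQ (m : List (List Int)) (n : Nat) (s : Int) : Int :=
  (((pvGrid n).filter (fun p => (p.1 : Int) + (p.2 : Int) == s)).map (pvCell m)).prod
-- key lists of the two dicts B builds
def pvMK (n : Nat) : List Int :=
  PySem.Set.ofList ((pvGrid n).map (fun p => (p.1 : Int) - (p.2 : Int)))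
def pvSK (n : Nat) : List Int :=
  PySem.Set.ofList ((pvGrid n).map (fun p => (p.1 : Int) + (p.2 : Int)))

theorem pv_foldl_mul {β : Type} (l : List β) (f : β → Int) (a : Int) :
    l.foldl (fun acc x => acc * f x) a = a * (l.map f).prod := by
  induction l generalizing a with
  | nil => simp
  | cons x t ih => simp [ih, mul_assoc]

theorem pv_A_eq (m : List (List Int)) :
    sum_prod_diags m =
      ∑ o ∈ Finset.range m.length,
        (((List.range (m.length - o)).map (fun j => pvCell m (j, j + o))).prod
          + (if o = 0 then 0 else ((List.range (m.length - o)).map (fun j => pvCell m (j + o, j))).prod)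
          - ((List.range (m.length - o)).map (fun j => pvCell m (m.length - 1 - j, j + o))).prod
          - (if o = 0 then 0 else ((List.range (m.length - o)).map (fun j => pvCell m (m.length - 1 - j - o, j))).prod)) := by
  simp only [sum_prod_diags]
  rw [PySem.List.pyRange_zero_natCast, List.foldl_map, PySem.List.foldl_add, zero_add]
  show ((List.range m.length).map _).sum = _
  rw [show ∀ (f : Nat → Int), ((List.range m.length).map f).sum = ∑ o ∈ Finset.range m.length, f o from fun f => rfl]
  apply Finset.sum_congr rfl
  intro o ho
  rw [Finset.mem_range] at ho
  have hno : ((m.length : Int) - (o : Int)) = ((m.length - o : Nat) : Int) := by omega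
  rw [hno, PySem.List.pyRange_zero_natCast, List.foldl_map]
  rw [PySem.List.foldl_prod_mk
        (f := fun (a : Int) (j : Nat) => a * PySem.List.pyGetD (PySem.List.pyGetD m (j : Int) []) ((j : Int) + (o : Int)) 0)
        (g := fun (s : Int × Int × Int) (j : Nat) =>
          (s.1 * PySem.List.pyGetD (PySem.List.pyGetD m ((j : Int) + (o : Int)) []) (j : Int) 0,
           s.2.1 * PySem.List.pyGetD (PySem.List.pyGetD m ((m.length : Int) - (j : Int) - 1) []) ((j : Int) + (o : Int)) 0,
           s.2.2 * PySem.List.pyGetD (PySem.List.pyGetD m ((m.length : Int) - (j : Int) - 1 - (o : Int)) []) (j : Int) 0))]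
  rw [PySem.List.foldl_prod_mk
        (f := fun (a : Int) (j : Nat) => a * PySem.List.pyGetD (PySem.List.pyGetD m ((j : Int) + (o : Int)) []) (j : Int) 0)
        (g := fun (s : Int × Int) (j : Nat) =>
          (s.1 * PySem.List.pyGetD (PySem.List.pyGetD m ((m.length : Int) - (j : Int) - 1) []) ((j : Int) + (o : Int)) 0,
           s.2 * PySem.List.pyGetD (PySem.List.pyGetD m ((m.length : Int) - (j : Int) - 1 - (o : Int)) []) (j : Int) 0))]
  rw [PySem.List.foldl_prod_mk
        (f := fun (a : Int) (j : Nat) => a * PySem.List.pyGetD (PySem.List.pyGetD m ((m.length : Int) - (j : Int) - 1) []) ((j : Int) + (o : Int)) 0)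
        (g := fun (a : Int) (j : Nat) => a * PySem.List.pyGetD (PySem.List.pyGetD m ((m.length : Int) - (j : Int) - 1 - (o : Int)) []) (j : Int) 0)]
  simp only [pv_foldl_mul, one_mul]
  have e1 : List.map (fun x : Nat => PySem.List.pyGetD (PySem.List.pyGetD m (x : Int) []) ((x : Int) + (o : Int)) 0) (List.range (m.length - o))
      = List.map (fun j => pvCell m (j, j + o)) (List.range (m.length - o)) := by
    apply List.map_congr_left
    intro j hj
    have h1 : ((j : Int) + (o : Int)) = ((j + o : Nat) : Int) := by push_cast; ring
    rw [h1, PySem.List.pyGetD_natCast, PySem.List.pyGetD_natCast]; rfl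
  have e2 : List.map (fun x : Nat => PySem.List.pyGetD (PySem.List.pyGetD m ((x : Int) + (o : Int)) []) (x : Int) 0) (List.range (m.length - o))
      = List.map (fun j => pvCell m (j + o, j)) (List.range (m.length - o)) := by
    apply List.map_congr_left
    intro j hj
    have h1 : ((j : Int) + (o : Int)) = ((j + o : Nat) : Int) := by push_cast; ring
    rw [h1, PySem.List.pyGetD_natCast, PySem.List.pyGetD_natCast]; rfl
  have e3 : List.map (fun x : Nat => PySem.List.pyGetD (PySem.List.pyGetD m ((m.length : Int) - (x : Int) - 1) []) ((x : Int) + (o : Int)) 0) (List.range (m.length - o))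
      = List.map (fun j => pvCell m (m.length - 1 - j, j + o)) (List.range (m.length - o)) := by
    apply List.map_congr_left
    intro j hj
    rw [List.mem_range] at hj
    have h1 : ((m.length : Int) - (j : Int) - 1) = ((m.length - 1 - j : Nat) : Int) := by omega
    have h2 : ((j : Int) + (o : Int)) = ((j + o : Nat) : Int) := by push_cast; ring
    rw [h1, h2, PySem.List.pyGetD_natCast, PySem.List.pyGetD_natCast]; rfl
  have e4 : List.map (fun x : Nat => PySem.List.pyGetD (PySem.List.pyGetD m ((m.length : Int) - (x : Int) - 1 - (o : Int)) []) (x : Int) 0) (List.range (m.length - o))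
      = List.map (fun j => pvCell m (m.length - 1 - j - o, j)) (List.range (m.length - o)) := by
    apply List.map_congr_left
    intro j hj
    rw [List.mem_range] at hj
    have h1 : ((m.length : Int) - (j : Int) - 1 - (o : Int)) = ((m.length - 1 - j - o : Nat) : Int) := by omega
    rw [h1, PySem.List.pyGetD_natCast, PySem.List.pyGetD_natCast]; rfl
  rw [e1, e2, e3, e4]
  simp only [beq_iff_eq, Nat.cast_eq_zero, ite_mul, zero_mul, one_mul]

theorem pv_getD_foldl_insert_mul {β : Type} (l : List β) (key : β → Int) (v : β → Int)
    (d : PySem.Dict Int Int) (k : Int) :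
    (l.foldl (fun d x => d.insert (key x) (d.getD (key x) 1 * v x)) d).getD k 1
      = d.getD k 1 * ((l.filter (fun x => key x == k)).map v).prod := by
  induction l generalizing d with
  | nil => simp
  | cons x t ih =>
      simp only [List.foldl_cons, List.filter_cons]
      rw [ih, PySem.Dict.getD_insert]
      by_cases h : key x = k
      · simp [h, mul_assoc]
      · rw [if_neg (fun e => h e.symm)]
        simp [h]

theorem pv_foldl_grid {σ : Type} (n : Nat) (F : σ → Nat → Nat → σ) (init : σ) :
    (List.range n).foldl (fun s i => (List.range n).foldl (fun s j => F s i j) s) init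
      = (pvGrid n).foldl (fun s p => F s p.1 p.2) init := by
  unfold pvGrid
  rw [List.foldl_flatMap]
  simp [List.foldl_map]

theorem pv_B_eq (m : List (List Int)) :
    sum_prod_diags_alt m =
      ((pvMK m.length).map (pvP m m.length)).sum - ((pvSK m.length).map (pvQ m m.length)).sum := by
  simp only [sum_prod_diags_alt]
  rw [PySem.List.pyRange_zero_natCast]
  simp only [List.foldl_map, PySem.List.pyGetD_natCast]
  rw [pv_foldl_grid (F := fun (st : PySem.Dict Int Int × PySem.Dict Int Int) (i j : Nat) =>
        (st.1.insert ((i : Int) - (j : Int)) (st.1.getD ((i : Int) - (j : Int)) 1 * (m.getD i []).getD j 0),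
         st.2.insert ((i : Int) + (j : Int)) (st.2.getD ((i : Int) + (j : Int)) 1 * (m.getD i []).getD j 0)))]
  rw [PySem.List.foldl_prod_mk
        (f := fun (d : PySem.Dict Int Int) (p : Nat × Nat) =>
          d.insert ((p.1 : Int) - (p.2 : Int)) (d.getD ((p.1 : Int) - (p.2 : Int)) 1 * (m.getD p.1 []).getD p.2 0))
        (g := fun (d : PySem.Dict Int Int) (p : Nat × Nat) =>
          d.insert ((p.1 : Int) + (p.2 : Int)) (d.getD ((p.1 : Int) + (p.2 : Int)) 1 * (m.getD p.1 []).getD p.2 0))]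
  have hmaj := PySem.Dict.nodup_keys_foldl_insert_key (ν := Int) (pvGrid m.length)
      (fun p => (p.1 : Int) - (p.2 : Int))
      (fun d p => d.getD ((p.1 : Int) - (p.2 : Int)) 1 * (m.getD p.1 []).getD p.2 0)
      PySem.Dict.empty PySem.Dict.nodup_keys_empty
  have hmin := PySem.Dict.nodup_keys_foldl_insert_key (ν := Int) (pvGrid m.length)
      (fun p => (p.1 : Int) + (p.2 : Int))
      (fun d p => d.getD ((p.1 : Int) + (p.2 : Int)) 1 * (m.getD p.1 []).getD p.2 0)
      PySem.Dict.empty PySem.Dict.nodup_keys_empty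
  rw [PySem.Dict.values_eq_map_keys _ hmaj 1, PySem.Dict.values_eq_map_keys _ hmin 1]
  rw [PySem.Dict.keys_foldl_insert_key, PySem.Dict.keys_foldl_insert_key]
  have hK1 : PySem.Set.update (PySem.Dict.empty (κ := Int) (ν := Int)).keys
      (List.map (fun p : Nat × Nat => (p.1 : Int) - (p.2 : Int)) (pvGrid m.length)) = pvMK m.length := by
    rw [PySem.Dict.keys_empty, pvMK, PySem.Set.ofList_eq_foldl]; rfl
  have hK2 : PySem.Set.update (PySem.Dict.empty (κ := Int) (ν := Int)).keys
      (List.map (fun p : Nat × Nat => (p.1 : Int) + (p.2 : Int)) (pvGrid m.length)) = pvSK m.length := by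
    rw [PySem.Dict.keys_empty, pvSK, PySem.Set.ofList_eq_foldl]; rfl
  rw [hK1, hK2]
  congr 1
  · congr 1
    apply List.map_congr_left
    intro k _
    rw [pv_getD_foldl_insert_mul]
    rw [PySem.Dict.getD_empty, one_mul]
    rfl
  · congr 1
    apply List.map_congr_left
    intro k _
    rw [pv_getD_foldl_insert_mul]
    rw [PySem.Dict.getD_empty, one_mul]
    rfl

theorem pv_flatten_if {α β : Type} (l : List α) (q : α → Bool) (f : α → β) :
    (l.map (fun i => if q i then [f i] else [])).flatten = (l.filter q).map f := by
  induction l with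
  | nil => simp
  | cons a t ih => by_cases h : q a <;> simp [h, ih]

theorem pv_filter_grid (n : Nat) (P : Nat × Nat → Bool) (q : Nat → Bool) (c : Nat → Nat)
    (h : ∀ i, i < n → ∀ j, j < n → P (i, j) = (q i && decide (j = c i)))
    (hc : ∀ i, i < n → q i = true → c i < n) :
    (pvGrid n).filter P = ((List.range n).filter q).map (fun i => (i, c i)) := by
  unfold pvGrid
  rw [List.filter_flatMap, List.flatMap_def, ← pv_flatten_if]
  congr 1
  apply List.map_congr_left
  intro i hi
  rw [List.mem_range] at hi
  rw [List.filter_map]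
  have hfc : List.filter (P ∘ fun j => (i, j)) (List.range n)
      = List.filter (fun j => q i && decide (j = c i)) (List.range n) := by
    apply List.filter_congr
    intro j hj
    rw [List.mem_range] at hj
    simpa using h i hi j hj
  rw [hfc]
  by_cases hq : q i = true
  · have hci := hc i hi hq
    simp only [hq, Bool.true_and, if_true]
    rw [List.filter_eq, List.count_range, if_pos hci]
    simp
  · rw [if_neg (by simp [hq])]
    have hz : (fun j => q i && decide (j = c i)) = fun _ => false := by
      funext j; simp; intro hcon; exact absurd hcon hq
    rw [hz]
    simp

theorem pv_filter_lt (n k : Nat) (h : k ≤ n) :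
    (List.range n).filter (fun i => decide (i < k)) = List.range k := by
  rw [← Nat.sub_add_cancel h, Nat.add_comm, List.range_add, List.filter_append]
  rw [List.filter_eq_self.mpr, List.filter_eq_nil_iff.mpr]
  · simp
  · intro a ha; simp at ha ⊢; omega
  · intro a ha; simp at ha ⊢; omega

theorem pv_filter_ge (n o : Nat) (h : o ≤ n) :
    (List.range n).filter (fun i => decide (o ≤ i)) = (List.range (n - o)).map (fun t => o + t) := by
  rw [← Nat.sub_add_cancel h, Nat.add_comm, List.range_add, List.filter_append]
  rw [List.filter_eq_nil_iff.mpr, List.filter_map]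
  · rw [List.filter_eq_self.mpr] <;> simp
  · intro a ha; simp at ha ⊢; omega

theorem pv_add_mem {s : List Int} {x : Int} (h : x ∈ s) : PySem.Set.add s x = s := by
  simp [PySem.Set.add, PySem.Set.contains, h]

theorem pv_add_fresh {s : List Int} {x : Int} (h : ¬ x ∈ s) : PySem.Set.add s x = s ++ [x] := by
  simp [PySem.Set.add, PySem.Set.contains, h]

theorem pv_update_mem (l : List Int) (s : List Int) (h : ∀ x ∈ l, x ∈ s) :
    l.foldl PySem.Set.add s = s := by
  induction l with
  | nil => rfl
  | cons a t ih =>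
      rw [List.foldl_cons, pv_add_mem (h a (by simp))]
      exact ih (fun x hx => h x (by simp [hx]))

theorem pv_update_fresh_nodup (l : List Int) (s : List Int) (hl : l.Nodup)
    (hd : ∀ x ∈ l, x ∉ s) : l.foldl PySem.Set.add s = s ++ l := by
  induction l generalizing s with
  | nil => simp
  | cons a t ih =>
      rw [List.foldl_cons, pv_add_fresh (hd a (by simp))]
      rw [ih (s ++ [a]) hl.of_cons]
      · simp
      · intro x hx
        simp only [List.mem_append, List.mem_singleton]
        rintro (hs | rfl)
        · exact hd x (by simp [hx]) hs
        · exact (List.nodup_cons.mp hl).1 hx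

theorem pv_SK_aux (n : Nat) : ∀ m, m ≤ n →
    ((List.range m).flatMap (fun i : Nat => (List.range n).map (fun j : Nat => (i : Int) + (j : Int)))).foldl
        PySem.Set.add ([] : List Int)
      = (if m = 0 then [] else (List.range n).map (fun t : Nat => (t : Int))
          ++ (List.range (m - 1)).map (fun t : Nat => (n : Int) + (t : Int))) := by
  intro m
  induction m with
  | zero => intro _; simp
  | succ m ih =>
      intro hmn
      rw [List.range_succ, List.flatMap_append, List.foldl_append, ih (by omega)]
      rw [List.flatMap_singleton]
      by_cases hm : m = 0
      · subst hm
        rw [if_pos rfl, if_neg (by omega)]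
        rw [pv_update_fresh_nodup _ _ ?nd (by simp)]
        · rw [List.nil_append]
          simp only [Nat.add_sub_cancel, List.range_zero, List.map_nil, List.append_nil]
          apply List.map_congr_left
          intro j _
          simp
        case nd =>
          exact List.Nodup.map_on (fun a _ b _ hab => by omega) List.nodup_range
      · rw [if_neg hm, if_neg (by omega)]
        obtain ⟨n', rfl⟩ : ∃ n', n = n' + 1 := ⟨n - 1, by omega⟩
        have hrow : List.map (fun j : Nat => (m : Int) + (j : Int)) (List.range (n' + 1))
            = List.map (fun j : Nat => (m : Int) + (j : Int)) (List.range n') ++ [(m : Int) + (n' : Int)] := by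
          rw [List.range_succ, List.map_append]
          rfl
        rw [hrow, List.foldl_append]
        rw [pv_update_mem (List.map (fun j : Nat => (m : Int) + (j : Int)) (List.range n')) _ ?mems]
        case mems =>
          intro x hx
          simp only [List.mem_map, List.mem_range] at hx
          obtain ⟨j, hj, rfl⟩ := hx
          simp only [List.mem_append, List.mem_map, List.mem_range]
          by_cases hv : m + j ≤ n'
          · left
            exact ⟨m + j, by omega, by omega⟩
          · right
            exact ⟨m + j - n' - 1, by omega, by omega⟩
        rw [List.foldl_cons, List.foldl_nil]
        rw [pv_add_fresh ?fresh]
        case fresh =>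
          simp only [List.mem_append, List.mem_map, List.mem_range]
          rintro (⟨t, ht, he⟩ | ⟨t, ht, he⟩) <;> omega
        have hr : List.range m = List.range (m - 1) ++ [m - 1] := by
          rw [← List.range_succ]
          congr 1
          omega
        have hlast : ((n' + 1 : Nat) : Int) + ((m - 1 : Nat) : Int) = (m : Int) + (n' : Int) := by
          push_cast [Nat.cast_sub (by omega : 1 ≤ m)]
          ring
        rw [Nat.add_sub_cancel, hr, List.map_append]
        simp
        omega

theorem pv_MK_aux (n : Nat) : ∀ m, m ≤ n →
    ((List.range m).flatMap (fun i : Nat => (List.range n).map (fun j : Nat => (i : Int) - (j : Int)))).foldl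
        PySem.Set.add ([] : List Int)
      = (if m = 0 then [] else (List.range n).map (fun t : Nat => -(t : Int))
          ++ (List.range (m - 1)).map (fun t : Nat => (t : Int) + 1)) := by
  intro m
  induction m with
  | zero => intro _; simp
  | succ m ih =>
      intro hmn
      rw [List.range_succ, List.flatMap_append, List.foldl_append, ih (by omega)]
      rw [List.flatMap_singleton]
      by_cases hm : m = 0
      · subst hm
        rw [if_pos rfl, if_neg (by omega)]
        rw [pv_update_fresh_nodup _ _ ?nd (by simp)]
        · rw [List.nil_append]
          simp only [Nat.add_sub_cancel, List.range_zero, List.map_nil, List.append_nil]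
          apply List.map_congr_left
          intro j _
          simp
        case nd =>
          exact List.Nodup.map_on (fun a _ b _ hab => by omega) List.nodup_range
      · rw [if_neg hm, if_neg (by omega)]
        obtain ⟨n', rfl⟩ : ∃ n', n = n' + 1 := ⟨n - 1, by omega⟩
        have hrow : List.map (fun j : Nat => (m : Int) - (j : Int)) (List.range (n' + 1))
            = (m : Int) :: List.map (fun j : Nat => (m : Int) - ((j : Int) + 1)) (List.range n') := by
          rw [List.range_succ_eq_map, List.map_cons, List.map_map]
          rw [show (m : Int) - ((0 : Nat) : Int) = (m : Int) by simp]
          congr 1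
        rw [hrow, List.foldl_cons]
        rw [pv_add_fresh ?fresh]
        case fresh =>
          simp only [List.mem_append, List.mem_map, List.mem_range]
          rintro (⟨t, ht, he⟩ | ⟨t, ht, he⟩) <;> omega
        rw [pv_update_mem]
        · have hr : List.range m = List.range (m - 1) ++ [m - 1] := by
            rw [← List.range_succ]
            congr 1
            omega
          have hlast : ((m - 1 : Nat) : Int) + 1 = (m : Int) := by omega
          rw [Nat.add_sub_cancel, hr, List.map_append]
          simp [hlast]
        · intro x hx
          simp only [List.mem_map, List.mem_range] at hx
          obtain ⟨j, hj, rfl⟩ := hx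
          simp only [List.mem_append, List.mem_map, List.mem_range, List.mem_singleton]
          by_cases hv : (1 : Int) ≤ (m : Int) - ((j : Int) + 1)
          · left; right
            exact ⟨(m - j - 2 : Nat), by omega, by omega⟩
          · left; left
            exact ⟨((j + 1) - m : Nat), by omega, by omega⟩

theorem pv_P_neg (m : List (List Int)) (o : Nat) (h : o < m.length) :
    pvP m m.length (-(o : Int))
      = ((List.range (m.length - o)).map (fun j => pvCell m (j, j + o))).prod := by
  unfold pvP
  rw [pv_filter_grid m.length _ (fun i => decide (i < m.length - o)) (fun i => i + o)
        (fun i hi j hj => by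
          rw [Bool.eq_iff_iff]
          simp only [beq_iff_eq, Bool.and_eq_true, decide_eq_true_eq]
          omega)
        (fun i hi hq => by simp only [decide_eq_true_eq] at hq; show i + o < m.length; omega)]
  rw [pv_filter_lt _ _ (by omega), List.map_map]
  rfl

theorem pv_P_pos (m : List (List Int)) (o : Nat) (h : o < m.length) :
    pvP m m.length (o : Int)
      = ((List.range (m.length - o)).map (fun j => pvCell m (j + o, j))).prod := by
  unfold pvP
  rw [pv_filter_grid m.length _ (fun i => decide (o ≤ i)) (fun i => i - o)
        (fun i hi j hj => by
          rw [Bool.eq_iff_iff]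
          simp only [beq_iff_eq, Bool.and_eq_true, decide_eq_true_eq]
          omega)
        (fun i hi hq => by show i - o < m.length; omega)]
  rw [pv_filter_ge _ _ (by omega), List.map_map, List.map_map]
  apply congrArg
  apply List.map_congr_left
  intro t ht
  rw [List.mem_range] at ht
  simp only [Function.comp_apply]
  congr 1
  simp only [Prod.mk.injEq]
  omega

theorem pv_Q_hi (m : List (List Int)) (o : Nat) (h : o < m.length) :
    pvQ m m.length ((m.length : Int) - 1 + (o : Int))
      = ((List.range (m.length - o)).map (fun j => pvCell m (m.length - 1 - j, j + o))).prod := by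
  unfold pvQ
  rw [pv_filter_grid m.length _ (fun i => decide (o ≤ i)) (fun i => m.length - 1 + o - i)
        (fun i hi j hj => by
          rw [Bool.eq_iff_iff]
          simp only [beq_iff_eq, Bool.and_eq_true, decide_eq_true_eq]
          omega)
        (fun i hi hq => by simp only [decide_eq_true_eq] at hq; show m.length - 1 + o - i < m.length; omega)]
  rw [pv_filter_ge _ _ (by omega), List.map_map, List.map_map]
  show (∏ t ∈ Finset.range (m.length - o), pvCell m (o + t, m.length - 1 + o - (o + t)))
      = ∏ j ∈ Finset.range (m.length - o), pvCell m (m.length - 1 - j, j + o)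
  rw [← Finset.prod_range_reflect (fun j => pvCell m (m.length - 1 - j, j + o)) (m.length - o)]
  apply Finset.prod_congr rfl
  intro t ht
  rw [Finset.mem_range] at ht
  congr 1
  simp only [Prod.mk.injEq]
  omega

theorem pv_Q_lo (m : List (List Int)) (o : Nat) (h : o < m.length) :
    pvQ m m.length ((m.length : Int) - 1 - (o : Int))
      = ((List.range (m.length - o)).map (fun j => pvCell m (m.length - 1 - j - o, j))).prod := by
  unfold pvQ
  rw [pv_filter_grid m.length _ (fun i => decide (i < m.length - o)) (fun i => m.length - 1 - o - i)
        (fun i hi j hj => by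
          rw [Bool.eq_iff_iff]
          simp only [beq_iff_eq, Bool.and_eq_true, decide_eq_true_eq]
          omega)
        (fun i hi hq => by show m.length - 1 - o - i < m.length; omega)]
  rw [pv_filter_lt _ _ (by omega), List.map_map]
  show (∏ t ∈ Finset.range (m.length - o), pvCell m (t, m.length - 1 - o - t))
      = ∏ j ∈ Finset.range (m.length - o), pvCell m (m.length - 1 - j - o, j)
  rw [← Finset.prod_range_reflect (fun j => pvCell m (m.length - 1 - j - o, j)) (m.length - o)]
  apply Finset.prod_congr rfl
  intro t ht
  rw [Finset.mem_range] at ht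
  congr 1
  simp only [Prod.mk.injEq]
  omega

theorem pv_MK_eq (n : Nat) :
    pvMK n = (List.range n).map (fun t : Nat => -(t : Int))
             ++ (List.range (n - 1)).map (fun t : Nat => (t : Int) + 1) := by
  unfold pvMK
  rw [PySem.Set.ofList_eq_foldl]
  have hg : (pvGrid n).map (fun p : Nat × Nat => (p.1 : Int) - (p.2 : Int))
      = (List.range n).flatMap (fun i : Nat => (List.range n).map (fun j : Nat => (i : Int) - (j : Int))) := by
    unfold pvGrid
    rw [List.map_flatMap]
    simp [List.map_map, Function.comp_def]
  rw [hg, pv_MK_aux n n le_rfl]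
  by_cases hn : n = 0
  · subst hn; simp
  · rw [if_neg hn]

theorem pv_SK_eq (n : Nat) :
    pvSK n = (List.range n).map (fun t : Nat => (t : Int))
             ++ (List.range (n - 1)).map (fun t : Nat => (n : Int) + (t : Int)) := by
  unfold pvSK
  rw [PySem.Set.ofList_eq_foldl]
  have hg : (pvGrid n).map (fun p : Nat × Nat => (p.1 : Int) + (p.2 : Int))
      = (List.range n).flatMap (fun i : Nat => (List.range n).map (fun j : Nat => (i : Int) + (j : Int))) := by
    unfold pvGrid
    rw [List.map_flatMap]
    simp [List.map_map, Function.comp_def]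
  rw [hg, pv_SK_aux n n le_rfl]
  by_cases hn : n = 0
  · subst hn; simp
  · rw [if_neg hn]

-- ===== VERDICT (by name: the statement is the Claim_ definition above) =====
theorem sum_prod_diags_spec : Claim_equal_sum_prod_diags := by
  intro matrix _ _
  unfold Spec_sum_prod_diags
  rw [pv_A_eq, pv_B_eq, pv_MK_eq, pv_SK_eq]
  rw [List.map_append, List.sum_append, List.map_append, List.sum_append]
  rw [List.map_map, List.map_map, List.map_map, List.map_map]
  rcases Nat.eq_zero_or_pos matrix.length with h0 | hpos
  · simp [h0]
  obtain ⟨k, hk⟩ : ∃ k, matrix.length = k + 1 := ⟨matrix.length - 1, by omega⟩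
  -- rewrite A's per-offset terms into per-diagonal products
  have hA : ∑ o ∈ Finset.range matrix.length,
        (((List.range (matrix.length - o)).map (fun j => pvCell matrix (j, j + o))).prod
          + (if o = 0 then 0 else ((List.range (matrix.length - o)).map (fun j => pvCell matrix (j + o, j))).prod)
          - ((List.range (matrix.length - o)).map (fun j => pvCell matrix (matrix.length - 1 - j, j + o))).prod
          - (if o = 0 then 0 else ((List.range (matrix.length - o)).map (fun j => pvCell matrix (matrix.length - 1 - j - o, j))).prod))
      = ∑ o ∈ Finset.range matrix.length,
        (pvP matrix matrix.length (-(o : Int))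
          + (if o = 0 then 0 else pvP matrix matrix.length (o : Int))
          - pvQ matrix matrix.length ((matrix.length : Int) - 1 + (o : Int))
          - (if o = 0 then 0 else pvQ matrix matrix.length ((matrix.length : Int) - 1 - (o : Int)))) := by
    apply Finset.sum_congr rfl
    intro o ho
    rw [Finset.mem_range] at ho
    rw [pv_P_neg matrix o ho, pv_Q_hi matrix o ho]
    by_cases h : o = 0
    · simp [h]
    · rw [if_neg h, if_neg h, if_neg h, if_neg h, pv_P_pos matrix o ho, pv_Q_lo matrix o ho]
  rw [hA]
  rw [Finset.sum_sub_distrib, Finset.sum_sub_distrib, Finset.sum_add_distrib]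
  -- name the pieces
  have e2 : ∑ o ∈ Finset.range matrix.length, (if o = 0 then 0 else pvP matrix matrix.length (o : Int))
      = ∑ t ∈ Finset.range k, pvP matrix matrix.length ((t : Int) + 1) := by
    rw [hk, Finset.sum_range_succ']
    simp only [Nat.succ_ne_zero, if_pos, Nat.cast_add, Nat.cast_one, add_zero]
    apply Finset.sum_congr rfl
    intro t _
    simp
  have e3 : ∑ o ∈ Finset.range matrix.length, pvQ matrix matrix.length ((matrix.length : Int) - 1 + (o : Int))
      = (∑ t ∈ Finset.range k, pvQ matrix matrix.length ((matrix.length : Int) + (t : Int)))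
        + pvQ matrix matrix.length ((k : Nat) : Int) := by
    rw [hk, Finset.sum_range_succ']
    congr 1
    · apply Finset.sum_congr rfl
      intro t _
      congr 1
      push_cast
      ring
    · congr 1
      push_cast
      ring
  have e4 : ∑ o ∈ Finset.range matrix.length, (if o = 0 then 0 else pvQ matrix matrix.length ((matrix.length : Int) - 1 - (o : Int)))
      = ∑ t ∈ Finset.range k, pvQ matrix matrix.length ((t : Nat) : Int) := by
    rw [hk, Finset.sum_range_succ']
    simp only [Nat.succ_ne_zero, if_pos, add_zero, if_false]
    rw [← Finset.sum_range_reflect (fun t => pvQ matrix (k + 1) ((t : Nat) : Int)) k]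
    apply Finset.sum_congr rfl
    intro t ht
    rw [Finset.mem_range] at ht
    congr 1
    omega
  have e5 : ((List.range matrix.length).map (fun t : Nat => pvQ matrix matrix.length ((t : Nat) : Int))).sum
      = (∑ t ∈ Finset.range k, pvQ matrix matrix.length ((t : Nat) : Int))
        + pvQ matrix matrix.length ((k : Nat) : Int) := by
    show (∑ t ∈ Finset.range matrix.length, pvQ matrix matrix.length ((t : Nat) : Int)) = _
    rw [hk, Finset.sum_range_succ]
  rw [e2, e3, e4]
  simp only [Function.comp_def]
  have b1 : ((List.range matrix.length).map (fun t : Nat => pvP matrix matrix.length (-(t : Int)))).sum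
      = ∑ o ∈ Finset.range matrix.length, pvP matrix matrix.length (-(o : Int)) := rfl
  have b2 : ((List.range (matrix.length - 1)).map (fun t : Nat => pvP matrix matrix.length ((t : Int) + 1))).sum
      = ∑ t ∈ Finset.range k, pvP matrix matrix.length ((t : Int) + 1) := by rw [hk]; rfl
  have b4 : ((List.range (matrix.length - 1)).map (fun t : Nat => pvQ matrix matrix.length ((matrix.length : Int) + (t : Int)))).sum
      = ∑ t ∈ Finset.range k, pvQ matrix matrix.length ((matrix.length : Int) + (t : Int)) := by rw [hk]; rfl
  rw [b1, b2, b4, e5]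
  ring
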